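-- pv_equiv track=rewrite | github.com/clintgeek/GeekPR | backend/app/services/analyzers/go.py | _find_body_end
-- ===== SOURCE A (Python) =====
-- def _find_body_end(text: str, start: int) -> int:
--     """Given an index at/after a function signature, find the index one
--     past the closing brace of the function body. Returns len(text) if the
--     body is truncated (common with partial diff snippets).
--
--     Skips content inside strings, raw strings, line comments, and block
--     comments so braces in those don't throw off the count.
--     """
--     i = start
--     n = len(text)
--     # Locate the opening brace of the body.
--     while i < n and text[i] != "{":
--         # Bail if we hit something that clearly isn't a signature char;
--         # but be lenient — multi-line signatures include newlines, commas,
--         # parens, identifiers, etc.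
--         i += 1
--     if i >= n:
--         return n
--
--     depth = 0
--     while i < n:
--         ch = text[i]
--         # Line comment.
--         if ch == "/" and i + 1 < n and text[i + 1] == "/":
--             nl = text.find("\n", i)
--             i = n if nl == -1 else nl + 1
--             continue
--         # Block comment.
--         if ch == "/" and i + 1 < n and text[i + 1] == "*":
--             end = text.find("*/", i + 2)
--             i = n if end == -1 else end + 2
--             continue
--         # Raw string — no escapes.
--         if ch == "`":
--             end = text.find("`", i + 1)
--             i = n if end == -1 else end + 1
--             continue
--         # Interpreted string — escape-aware.
--         if ch == '"':
--             j = i + 1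
--             while j < n:
--                 if text[j] == "\\" and j + 1 < n:
--                     j += 2
--                     continue
--                 if text[j] == '"':
--                     break
--                 j += 1
--             i = j + 1
--             continue
--         if ch == "{":
--             depth += 1
--         elif ch == "}":
--             depth -= 1
--             if depth == 0:
--                 return i + 1
--         i += 1
--     return n
-- ===== SOURCE B (Python) =====
-- def _find_body_end(text: str, start: int) -> int:
--     """Explicit finite-state scanner: one mode variable (normal / line comment /
--     block comment / raw string / interpreted string) consumed one character at a
--     time, instead of str.find-based skipping."""
--     n = len(text)
--     i = start
--     while i < n and text[i] != "{":
--         i += 1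
--     if i >= n:
--         return n
--     depth = 0
--     NORMAL, LINE, BLOCK, RAW, STR = range(5)
--     mode = NORMAL
--     while i < n:
--         c = text[i]
--         if mode == NORMAL:
--             if c == "/" and i + 1 < n and text[i + 1] == "/":
--                 mode = LINE
--                 i += 2
--                 continue
--             if c == "/" and i + 1 < n and text[i + 1] == "*":
--                 mode = BLOCK
--                 i += 2
--                 continue
--             if c == "`":
--                 mode = RAW
--             elif c == '"':
--                 mode = STR
--             elif c == "{":
--                 depth += 1
--             elif c == "}":
--                 depth -= 1
--                 if depth == 0:
--                     return i + 1
--             i += 1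
--         elif mode == LINE:
--             if c == "\n":
--                 mode = NORMAL
--             i += 1
--         elif mode == BLOCK:
--             if c == "*" and i + 1 < n and text[i + 1] == "/":
--                 mode = NORMAL
--                 i += 2
--             else:
--                 i += 1
--         elif mode == RAW:
--             if c == "`":
--                 mode = NORMAL
--             i += 1
--         else:  # STR
--             if c == "\\" and i + 1 < n:
--                 i += 2
--             elif c == '"':
--                 mode = NORMAL
--                 i += 1
--             else:
--                 i += 1
--     return n
-- ===== Notes on version B (the rewrite author's own statement) =====
-- stated objective: alternative
-- what changed: Replaced A's find()-based multi-character skipping (separate str.find jumps for line comments, block comments, raw strings and an inner escape loop for interpreted strings) by a single character-at-a-time finite-state scanner with an explicit mode variable (normal / line comment / block comment / raw string / interpreted string).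
-- outside the precondition, e.g. on _find_body_end('{//}\n}', -6): A returns 6, B returns 0
import Mathlib
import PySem

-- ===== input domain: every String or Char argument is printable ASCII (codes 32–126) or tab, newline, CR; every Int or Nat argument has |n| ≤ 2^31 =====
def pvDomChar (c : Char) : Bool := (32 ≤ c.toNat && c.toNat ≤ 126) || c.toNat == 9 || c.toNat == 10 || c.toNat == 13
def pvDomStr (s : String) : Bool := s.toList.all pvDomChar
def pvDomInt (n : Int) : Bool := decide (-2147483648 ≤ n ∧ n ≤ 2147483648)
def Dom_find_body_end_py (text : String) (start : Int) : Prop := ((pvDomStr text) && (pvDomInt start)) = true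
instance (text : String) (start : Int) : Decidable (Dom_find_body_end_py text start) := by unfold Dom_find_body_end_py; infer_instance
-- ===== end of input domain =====

-- B replaces A's str.find-based multi-character skips by a one-character-at-a-time
-- finite-state scanner (mode = normal / line comment / block comment / raw string /
-- interpreted string); alternative decomposition, same O(n) cost.

-- ===== PORT A =====
-- fuel = remaining loop iterations; each iteration strictly advances the index,
-- so the fuel chosen at each call site is never exhausted (it only makes the loop total).

-- A's first while loop: advance i until text[i] == '{' or i >= n.
def aFindOpen (cs : List Char) (n : Int) : Int → Nat → Int
  | i, 0 => i
  | i, f + 1 =>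
    if i < n ∧ PySem.List.pyGetD cs i ' ' ≠ '{' then aFindOpen cs n (i + 1) f else i

-- A's inner while loop for an interpreted string: returns the final j.
def aStrScan (cs : List Char) (n : Int) : Int → Nat → Int
  | j, 0 => j
  | j, f + 1 =>
    if j < n then
      if PySem.List.pyGetD cs j ' ' = '\\' ∧ j + 1 < n then aStrScan cs n (j + 2) f
      else if PySem.List.pyGetD cs j ' ' = '"' then j
      else aStrScan cs n (j + 1) f
    else j

-- A's main while loop (find-based skipping of comments and strings).
def aLoop (cs : List Char) (n : Int) : Int → Int → Nat → Int
  | _, _, 0 => n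
  | i, depth, f + 1 =>
    if i < n then
      if PySem.List.pyGetD cs i ' ' = '/' ∧ i + 1 < n ∧ PySem.List.pyGetD cs (i + 1) ' ' = '/' then
        -- line comment: i = n if nl == -1 else nl + 1
        (if PySem.Chars.findFrom cs ['\n'] i = -1 then aLoop cs n n depth f
         else aLoop cs n (PySem.Chars.findFrom cs ['\n'] i + 1) depth f)
      else if PySem.List.pyGetD cs i ' ' = '/' ∧ i + 1 < n ∧ PySem.List.pyGetD cs (i + 1) ' ' = '*' then
        -- block comment: i = n if end == -1 else end + 2
        (if PySem.Chars.findFrom cs ['*', '/'] (i + 2) = -1 then aLoop cs n n depth f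
         else aLoop cs n (PySem.Chars.findFrom cs ['*', '/'] (i + 2) + 2) depth f)
      else if PySem.List.pyGetD cs i ' ' = '`' then
        -- raw string: i = n if end == -1 else end + 1
        (if PySem.Chars.findFrom cs ['`'] (i + 1) = -1 then aLoop cs n n depth f
         else aLoop cs n (PySem.Chars.findFrom cs ['`'] (i + 1) + 1) depth f)
      else if PySem.List.pyGetD cs i ' ' = '"' then
        -- interpreted string: i = j + 1
        aLoop cs n (aStrScan cs n (i + 1) ((n - (i + 1)).toNat + 1) + 1) depth f
      else if PySem.List.pyGetD cs i ' ' = '{' then aLoop cs n (i + 1) (depth + 1) f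
      else if PySem.List.pyGetD cs i ' ' = '}' then
        (if depth - 1 = 0 then i + 1 else aLoop cs n (i + 1) (depth - 1) f)
      else aLoop cs n (i + 1) depth f
    else n

def find_body_end_py (text : String) (start : Int) : Int :=
  let cs := text.toList
  let n : Int := (cs.length : Int)
  let i := aFindOpen cs n start ((n - start).toNat + 1)
  if n ≤ i then n else aLoop cs n i 0 ((n - i).toNat + 1)

-- ===== PORT B =====
-- B's first while loop (same trivial scan to the opening brace as A's).
def bFindOpen (cs : List Char) (n : Int) : Int → Nat → Int
  | i, 0 => i
  | i, f + 1 =>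
    if i < n ∧ PySem.List.pyGetD cs i ' ' ≠ '{' then bFindOpen cs n (i + 1) f else i

-- B's single finite-state loop: m = 0 normal, 1 line comment, 2 block comment,
-- 3 raw string, 4 interpreted string; one character consumed per step.
def bLoop (cs : List Char) (n : Int) : Int → Int → Nat → Nat → Int
  | _, _, _, 0 => n
  | i, depth, m, f + 1 =>
    if i < n then
      if m = 0 then
        if PySem.List.pyGetD cs i ' ' = '/' ∧ i + 1 < n ∧ PySem.List.pyGetD cs (i + 1) ' ' = '/' then
          bLoop cs n (i + 2) depth 1 f
        else if PySem.List.pyGetD cs i ' ' = '/' ∧ i + 1 < n ∧ PySem.List.pyGetD cs (i + 1) ' ' = '*' then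
          bLoop cs n (i + 2) depth 2 f
        else if PySem.List.pyGetD cs i ' ' = '`' then bLoop cs n (i + 1) depth 3 f
        else if PySem.List.pyGetD cs i ' ' = '"' then bLoop cs n (i + 1) depth 4 f
        else if PySem.List.pyGetD cs i ' ' = '{' then bLoop cs n (i + 1) (depth + 1) 0 f
        else if PySem.List.pyGetD cs i ' ' = '}' then
          (if depth - 1 = 0 then i + 1 else bLoop cs n (i + 1) (depth - 1) 0 f)
        else bLoop cs n (i + 1) depth 0 f
      else if m = 1 then
        if PySem.List.pyGetD cs i ' ' = '\n' then bLoop cs n (i + 1) depth 0 f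
        else bLoop cs n (i + 1) depth 1 f
      else if m = 2 then
        if PySem.List.pyGetD cs i ' ' = '*' ∧ i + 1 < n ∧ PySem.List.pyGetD cs (i + 1) ' ' = '/' then
          bLoop cs n (i + 2) depth 0 f
        else bLoop cs n (i + 1) depth 2 f
      else if m = 3 then
        if PySem.List.pyGetD cs i ' ' = '`' then bLoop cs n (i + 1) depth 0 f
        else bLoop cs n (i + 1) depth 3 f
      else
        if PySem.List.pyGetD cs i ' ' = '\\' ∧ i + 1 < n then bLoop cs n (i + 2) depth 4 f
        else if PySem.List.pyGetD cs i ' ' = '"' then bLoop cs n (i + 1) depth 0 f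
        else bLoop cs n (i + 1) depth 4 f
    else n

def find_body_end_py_alt (text : String) (start : Int) : Int :=
  let cs := text.toList
  let n : Int := (cs.length : Int)
  let i := bFindOpen cs n start ((n - start).toNat + 1)
  if n ≤ i then n else bLoop cs n i 0 0 ((n - i).toNat + 1)

-- ===== PRECONDITION & SPEC =====
-- Pre_ excludes negative start: a scan position before the string is meaningless for
-- this scanner, and what A does there is an accident of Python's negative-index
-- wraparound combined with str.find's clamping (A raises IndexError once
-- start < -len(text)); B's scanner may legitimately differ on that corner.
def Pre_find_body_end_py (text : String) (start : Int) : Prop := 0 ≤ start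
instance (text : String) (start : Int) : Decidable (Pre_find_body_end_py text start) := by
  unfold Pre_find_body_end_py; infer_instance

def pvWitness_find_body_end_py : String × Int := ("func f() { if x { y() } }", 0)

def Spec_find_body_end_py (text : String) (start : Int) (out : Int) : Prop := out = find_body_end_py_alt text start
instance (text : String) (start : Int) (out : Int) : Decidable (Spec_find_body_end_py text start out) := by unfold Spec_find_body_end_py; infer_instance

-- ===== CLAIM (what is proved, stated in full; the proofs are below) =====
def Claim_equal_find_body_end_py : Prop := ∀ (text : String) (start : Int), Dom_find_body_end_py text start → Pre_find_body_end_py text start → Spec_find_body_end_py text start (find_body_end_py text start)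

-- ===== LEMMAS AND PROOFS =====

theorem aStrScan_ge (cs : List Char) (n : Int) : ∀ (f : Nat) (j : Int), j ≤ aStrScan cs n j f := by
  intro f
  induction f with
  | zero => intro j; simp [aStrScan]
  | succ f ih =>
    intro j
    simp only [aStrScan]
    split_ifs <;> first | omega | (exact le_trans (by omega) (ih _))

theorem aStrScan_fuel (cs : List Char) (n : Int) : ∀ (f g : Nat) (j : Int),
    (n - j).toNat < f → (n - j).toNat < g → aStrScan cs n j f = aStrScan cs n j g := by
  intro f
  induction f with
  | zero => omega
  | succ f ih =>
    intro g j hf hg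
    cases g with
    | zero => omega
    | succ g =>
      simp only [aStrScan]
      split_ifs with h1 h2 h3 <;> first | rfl | (apply ih <;> omega)

theorem bLoop_fuel (cs : List Char) (n : Int) : ∀ (f g : Nat) (i depth : Int) (m : Nat),
    (n - i).toNat < f → (n - i).toNat < g → bLoop cs n i depth m f = bLoop cs n i depth m g := by
  intro f
  induction f with
  | zero => omega
  | succ f ih =>
    intro g i depth m hf hg
    cases g with
    | zero => omega
    | succ g =>
      simp only [bLoop]
      split_ifs <;> first | rfl | (apply ih <;> omega)

theorem bLoop_exit (cs : List Char) (n : Int) : ∀ (f : Nat) (i depth : Int) (m : Nat),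
    n ≤ i → bLoop cs n i depth m f = n := by
  intro f i depth m h
  cases f <;> simp only [bLoop] <;> split_ifs <;> first | rfl | omega

theorem pvGetNat (cs : List Char) (j : Nat) (h : j < cs.length) :
    PySem.List.pyGetD cs (j : Int) ' ' = cs[j] := by
  rw [PySem.List.pyGetD_natCast, List.getD_eq_getElem _ _ h]

theorem pvPrefixOne (cs : List Char) (c : Char) (j : Nat) (h : j < cs.length) :
    ([c] <+: cs.drop j) ↔ cs[j] = c := by
  rw [List.drop_eq_getElem_cons h, List.cons_prefix_cons]
  simp [eq_comm]

theorem pvPrefixTwo (cs : List Char) (c d : Char) (j : Nat) (h : j < cs.length) :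
    ([c, d] <+: cs.drop j) ↔ (cs[j] = c ∧ j + 1 < cs.length ∧ cs.getD (j+1) ' ' = d) := by
  rw [List.drop_eq_getElem_cons h, List.cons_prefix_cons]
  by_cases h2 : j + 1 < cs.length
  · rw [pvPrefixOne cs d (j+1) h2, List.getD_eq_getElem _ _ h2]
    simp [eq_comm, h2]
  · have : cs.drop (j+1) = [] := by
      apply List.drop_eq_nil_of_le; omega
    simp [this, eq_comm, h2]

theorem pvFfNil (cs : List Char) (sub : List Char) (hsub : sub ≠ []) :
    PySem.Chars.findFrom cs sub (cs.length : Int) = -1 := by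
  rw [PySem.Chars.findFrom_natCast_eq_neg_one_iff cs sub cs.length le_rfl]
  simp [List.infix_nil, hsub]

theorem pvFfSelf (cs : List Char) (sub : List Char) (j : Nat) (hj : j ≤ cs.length)
    (h : sub <+: cs.drop j) : PySem.Chars.findFrom cs sub (j : Int) = (j : Int) := by
  have hne : PySem.Chars.findFrom cs sub (j : Int) ≠ -1 := by
    rw [Ne, PySem.Chars.findFrom_natCast_eq_neg_one_iff cs sub j hj]
    simp only [not_not]
    exact h.isInfix
  obtain ⟨h1, h2, h3⟩ := PySem.Chars.findFrom_natCast_spec cs sub j hj hne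
  by_contra hne2
  have hgt : j < (PySem.Chars.findFrom cs sub (j : Int)).toNat := by omega
  exact h3 j le_rfl hgt h

theorem pvFfStep (cs : List Char) (sub : List Char) (j : Nat) (hj : j < cs.length)
    (hsub : sub ≠ []) (h : ¬ sub <+: cs.drop j) :
    PySem.Chars.findFrom cs sub (j : Int) = PySem.Chars.findFrom cs sub ((j : Int) + 1) := by
  have hcast : ((j : Int) + 1) = ((j + 1 : Nat) : Int) := by push_cast; ring
  rw [hcast]
  have hj1 : j + 1 ≤ cs.length := by omega
  have hdrop : cs.drop j = cs[j] :: cs.drop (j+1) := List.drop_eq_getElem_cons hj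
  have hinf : sub <:+: cs.drop j ↔ sub <:+: cs.drop (j+1) := by
    rw [hdrop, List.infix_cons_iff, ← hdrop]
    tauto
  by_cases hcase : PySem.Chars.findFrom cs sub ((j+1 : Nat) : Int) = -1
  · rw [hcase]
    rw [PySem.Chars.findFrom_natCast_eq_neg_one_iff cs sub j (by omega)]
    rw [PySem.Chars.findFrom_natCast_eq_neg_one_iff cs sub (j+1) hj1] at hcase
    rw [hinf]; exact hcase
  · obtain ⟨h1, h2, h3⟩ := PySem.Chars.findFrom_natCast_spec cs sub (j+1) hj1 hcase
    have hne : PySem.Chars.findFrom cs sub (j : Int) ≠ -1 := by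
      rw [Ne, PySem.Chars.findFrom_natCast_eq_neg_one_iff cs sub j (by omega), not_not, hinf]
      rw [PySem.Chars.findFrom_natCast_eq_neg_one_iff cs sub (j+1) hj1] at hcase
      tauto
    obtain ⟨g1, g2, g3⟩ := PySem.Chars.findFrom_natCast_spec cs sub j (by omega) hne
    set q := PySem.Chars.findFrom cs sub (j : Int) with hq
    set r := PySem.Chars.findFrom cs sub ((j+1 : Nat) : Int) with hr
    rcases lt_trichotomy q.toNat r.toNat with hlt | heq | hgt
    · exfalso
      by_cases hqj : q.toNat = j
      · rw [hqj] at g2; exact h g2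
      · exact h3 q.toNat (by omega) hlt g2
    · omega
    · exfalso; exact g3 r.toNat (by omega) hgt h2

theorem aLoop_exit (cs : List Char) (n : Int) : ∀ (f : Nat) (i depth : Int),
    n ≤ i → aLoop cs n i depth f = n := by
  intro f i depth h
  cases f <;> simp only [aLoop] <;> split_ifs <;> first | rfl | omega

theorem pvCast1 (j : Nat) : ((j : Int) + 1) = ((j + 1 : Nat) : Int) := by push_cast; ring

theorem pvCast2 (j : Nat) : ((j : Int) + 2) = ((j + 2 : Nat) : Int) := by push_cast; ring

theorem pvGetNat1 (cs : List Char) (j : Nat) :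
    PySem.List.pyGetD cs ((j : Int) + 1) ' ' = cs.getD (j + 1) ' ' := by
  rw [pvCast1, PySem.List.pyGetD_natCast]

theorem pvLBline (cs : List Char) : ∀ (f : Nat) (j : Nat) (d : Int) (g : Nat),
    j ≤ cs.length → cs.length - j < f → cs.length - j < g →
    bLoop cs (cs.length : Int) (j : Int) d 1 f =
      (if PySem.Chars.findFrom cs ['\n'] (j : Int) = -1 then (cs.length : Int)
       else bLoop cs (cs.length : Int) (PySem.Chars.findFrom cs ['\n'] (j : Int) + 1) d 0 g) := by
  intro f
  induction f with
  | zero => omega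
  | succ f ih =>
    intro j d g hj hf hg
    by_cases hjl : j < cs.length
    · have hlt : (j : Int) < (cs.length : Int) := by exact_mod_cast hjl
      have hget := pvGetNat cs j hjl
      simp only [bLoop, if_pos hlt, if_true, show ((1:Nat)=0)=False from by decide, if_false]
      rw [hget]
      by_cases hc : cs[j] = '\n'
      · have hff : PySem.Chars.findFrom cs ['\n'] (j : Int) = (j : Int) :=
          pvFfSelf cs ['\n'] j hj ((pvPrefixOne cs '\n' j hjl).mpr hc)
        rw [if_pos hc, hff, if_neg (by omega)]
        apply bLoop_fuel <;> omega
      · have hstep := pvFfStep cs ['\n'] j hjl (by simp)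
          (fun h => hc ((pvPrefixOne cs '\n' j hjl).mp h))
        rw [if_neg hc, hstep, pvCast1]
        exact ih (j + 1) d g (by omega) (by omega) (by omega)
    · have hje : j = cs.length := by omega
      subst hje
      rw [pvFfNil cs ['\n'] (by simp), if_pos rfl]
      exact bLoop_exit cs _ _ _ _ _ (by omega)

theorem pvLBraw (cs : List Char) : ∀ (f : Nat) (j : Nat) (d : Int) (g : Nat),
    j ≤ cs.length → cs.length - j < f → cs.length - j < g →
    bLoop cs (cs.length : Int) (j : Int) d 3 f =
      (if PySem.Chars.findFrom cs ['`'] (j : Int) = -1 then (cs.length : Int)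
       else bLoop cs (cs.length : Int) (PySem.Chars.findFrom cs ['`'] (j : Int) + 1) d 0 g) := by
  intro f
  induction f with
  | zero => omega
  | succ f ih =>
    intro j d g hj hf hg
    by_cases hjl : j < cs.length
    · have hlt : (j : Int) < (cs.length : Int) := by exact_mod_cast hjl
      have hget := pvGetNat cs j hjl
      simp only [bLoop, if_pos hlt, if_true, show ((3:Nat)=0)=False from by decide, show ((3:Nat)=1)=False from by decide,
        show ((3:Nat)=2)=False from by decide, if_false]
      rw [hget]
      by_cases hc : cs[j] = '`'
      · have hff : PySem.Chars.findFrom cs ['`'] (j : Int) = (j : Int) :=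
          pvFfSelf cs ['`'] j hj ((pvPrefixOne cs '`' j hjl).mpr hc)
        rw [if_pos hc, hff, if_neg (by omega)]
        apply bLoop_fuel <;> omega
      · have hstep := pvFfStep cs ['`'] j hjl (by simp)
          (fun h => hc ((pvPrefixOne cs '`' j hjl).mp h))
        rw [if_neg hc, hstep, pvCast1]
        exact ih (j + 1) d g (by omega) (by omega) (by omega)
    · have hje : j = cs.length := by omega
      subst hje
      rw [pvFfNil cs ['`'] (by simp), if_pos rfl]
      exact bLoop_exit cs _ _ _ _ _ (by omega)

theorem pvLBblock (cs : List Char) : ∀ (f : Nat) (j : Nat) (d : Int) (g : Nat),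
    j ≤ cs.length → cs.length - j < f → cs.length - j < g →
    bLoop cs (cs.length : Int) (j : Int) d 2 f =
      (if PySem.Chars.findFrom cs ['*', '/'] (j : Int) = -1 then (cs.length : Int)
       else bLoop cs (cs.length : Int) (PySem.Chars.findFrom cs ['*', '/'] (j : Int) + 2) d 0 g) := by
  intro f
  induction f with
  | zero => omega
  | succ f ih =>
    intro j d g hj hf hg
    by_cases hjl : j < cs.length
    · have hlt : (j : Int) < (cs.length : Int) := by exact_mod_cast hjl
      have hget := pvGetNat cs j hjl
      have hpair := pvPrefixTwo cs '*' '/' j hjl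
      simp only [bLoop, if_pos hlt, if_true, show ((2:Nat)=0)=False from by decide, show ((2:Nat)=1)=False from by decide, if_false]
      rw [hget, pvGetNat1]
      by_cases hp : ['*', '/'] <+: cs.drop j
      · obtain ⟨h1, h2, h3⟩ := hpair.mp hp
        have hff : PySem.Chars.findFrom cs ['*', '/'] (j : Int) = (j : Int) :=
          pvFfSelf cs ['*', '/'] j hj hp
        rw [if_pos ⟨h1, by exact_mod_cast h2, h3⟩, hff, if_neg (by omega)]
        apply bLoop_fuel <;> omega
      · have hstep := pvFfStep cs ['*', '/'] j hjl (by simp)  hp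
        rw [if_neg (fun ⟨h1, h2, h3⟩ => hp (hpair.mpr ⟨h1, by exact_mod_cast h2, h3⟩)),
          hstep, pvCast1]
        exact ih (j + 1) d g (by omega) (by omega) (by omega)
    · have hje : j = cs.length := by omega
      subst hje
      rw [pvFfNil cs ['*', '/'] (by simp), if_pos rfl]
      exact bLoop_exit cs _ _ _ _ _ (by omega)

theorem pvLBstr (cs : List Char) : ∀ (f : Nat) (j : Nat) (d : Int) (g : Nat),
    j ≤ cs.length → cs.length - j < f → cs.length - j < g →
    bLoop cs (cs.length : Int) (j : Int) d 4 f =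
      bLoop cs (cs.length : Int)
        (aStrScan cs (cs.length : Int) (j : Int) (cs.length - j + 1) + 1) d 0 g := by
  intro f
  induction f with
  | zero => omega
  | succ f ih =>
    intro j d g hj hf hg
    by_cases hjl : j < cs.length
    · have hlt : (j : Int) < (cs.length : Int) := by exact_mod_cast hjl
      have hget := pvGetNat cs j hjl
      simp only [bLoop, if_pos hlt, show ((4:Nat)=0)=False from by decide, show ((4:Nat)=1)=False from by decide,
        show ((4:Nat)=2)=False from by decide, show ((4:Nat)=3)=False from by decide, if_false]
      simp only [aStrScan, if_pos hlt]
      rw [hget]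
      by_cases hbs : cs[j] = '\\' ∧ (j : Int) + 1 < (cs.length : Int)
      · rw [if_pos hbs, if_pos hbs, pvCast2]
        rw [aStrScan_fuel cs _ (cs.length - j) (cs.length - (j + 2) + 1) _ (by omega) (by omega)]
        exact ih (j + 2) d g (by omega) (by omega) (by omega)
      · rw [if_neg hbs, if_neg hbs]
        by_cases hq : cs[j] = '"'
        · rw [if_pos hq, if_pos hq]
          apply bLoop_fuel <;> omega
        · rw [if_neg hq, if_neg hq, pvCast1]
          rw [aStrScan_fuel cs _ (cs.length - j) (cs.length - (j + 1) + 1) _ (by omega) (by omega)]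
          exact ih (j + 1) d g (by omega) (by omega) (by omega)
    · have hje : j = cs.length := by omega
      subst hje
      have hnlt : ¬ ((cs.length : Int) < (cs.length : Int)) := by omega
      simp only [aStrScan, if_neg hnlt]
      rw [bLoop_exit cs _ _ _ _ _ (by omega), bLoop_exit cs _ _ _ _ _ (by omega)]

theorem pvMain (cs : List Char) : ∀ (f : Nat) (j : Nat) (d : Int),
    j ≤ cs.length → cs.length - j < f →
    aLoop cs (cs.length : Int) (j : Int) d f = bLoop cs (cs.length : Int) (j : Int) d 0 f := by
  intro f
  induction f with
  | zero => omega
  | succ f ih =>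
    intro j d hj hf
    by_cases hjl : j < cs.length
    · have hlt : (j : Int) < (cs.length : Int) := by exact_mod_cast hjl
      have hget := pvGetNat cs j hjl
      simp only [aLoop, bLoop, if_pos hlt, if_true]
      rw [hget]
      by_cases h1 : cs[j] = '/' ∧ (j : Int) + 1 < (cs.length : Int) ∧
          PySem.List.pyGetD cs ((j : Int) + 1) ' ' = '/'
      · rw [if_pos h1, if_pos h1]
        obtain ⟨hc0, hlt1, hc1⟩ := h1
        have hj1 : j + 1 < cs.length := by exact_mod_cast hlt1
        have hc1' : cs[j + 1] = '/' := by
          rw [← List.getD_eq_getElem cs ' ' hj1, ← pvGetNat1 cs j]; exact hc1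
        have hs : PySem.Chars.findFrom cs ['\n'] (j : Int) =
            PySem.Chars.findFrom cs ['\n'] ((j + 2 : Nat) : Int) := by
          rw [pvFfStep cs ['\n'] j hjl (by simp)
              (fun h => by
                have hx := (pvPrefixOne cs '\n' j hjl).mp h
                rw [hc0] at hx
                exact (by decide : ('/' : Char) ≠ '\n') hx),
            pvCast1,
            pvFfStep cs ['\n'] (j + 1) hj1 (by simp)
              (fun h => by
                have hx := (pvPrefixOne cs '\n' (j + 1) hj1).mp h
                rw [hc1'] at hx
                exact (by decide : ('/' : Char) ≠ '\n') hx)]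
          congr 1
        rw [hs, pvCast2, pvLBline cs f (j + 2) d f (by omega) (by omega) (by omega)]
        by_cases hm : PySem.Chars.findFrom cs ['\n'] ((j + 2 : Nat) : Int) = -1
        · rw [if_pos hm, if_pos hm, aLoop_exit cs _ _ _ _ (le_refl _)]
        · rw [if_neg hm, if_neg hm]
          obtain ⟨hge, hpre, -⟩ :=
            PySem.Chars.findFrom_natCast_spec cs ['\n'] (j + 2) (by omega) hm
          have hlen := hpre.length_le
          simp only [List.length_drop, List.length_cons, List.length_nil] at hlen
          have hcast : PySem.Chars.findFrom cs ['\n'] ((j + 2 : Nat) : Int) + 1 =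
              (((PySem.Chars.findFrom cs ['\n'] ((j + 2 : Nat) : Int)).toNat + 1 : Nat) : Int) := by
            omega
          rw [hcast]
          exact ih _ d (by omega) (by omega)
      · rw [if_neg h1, if_neg h1]
        by_cases h2 : cs[j] = '/' ∧ (j : Int) + 1 < (cs.length : Int) ∧
            PySem.List.pyGetD cs ((j : Int) + 1) ' ' = '*'
        · rw [if_pos h2, if_pos h2, pvCast2,
            pvLBblock cs f (j + 2) d f (by omega) (by omega) (by omega)]
          by_cases hm : PySem.Chars.findFrom cs ['*', '/'] ((j + 2 : Nat) : Int) = -1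
          · rw [if_pos hm, if_pos hm, aLoop_exit cs _ _ _ _ (le_refl _)]
          · rw [if_neg hm, if_neg hm]
            obtain ⟨hge, hpre, -⟩ :=
              PySem.Chars.findFrom_natCast_spec cs ['*', '/'] (j + 2) (by omega) hm
            have hlen := hpre.length_le
            simp only [List.length_drop, List.length_cons, List.length_nil] at hlen
            have hcast : PySem.Chars.findFrom cs ['*', '/'] ((j + 2 : Nat) : Int) + 2 =
                (((PySem.Chars.findFrom cs ['*', '/'] ((j + 2 : Nat) : Int)).toNat + 2 : Nat) : Int) := by
              omega
            rw [hcast]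
            exact ih _ d (by omega) (by omega)
        · rw [if_neg h2, if_neg h2]
          by_cases h3 : cs[j] = '`'
          · rw [if_pos h3, if_pos h3, pvCast1,
              pvLBraw cs f (j + 1) d f (by omega) (by omega) (by omega)]
            by_cases hm : PySem.Chars.findFrom cs ['`'] ((j + 1 : Nat) : Int) = -1
            · rw [if_pos hm, if_pos hm, aLoop_exit cs _ _ _ _ (le_refl _)]
            · rw [if_neg hm, if_neg hm]
              obtain ⟨hge, hpre, -⟩ :=
                PySem.Chars.findFrom_natCast_spec cs ['`'] (j + 1) (by omega) hm
              have hlen := hpre.length_le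
              simp only [List.length_drop, List.length_cons, List.length_nil] at hlen
              have hcast : PySem.Chars.findFrom cs ['`'] ((j + 1 : Nat) : Int) + 1 =
                  (((PySem.Chars.findFrom cs ['`'] ((j + 1 : Nat) : Int)).toNat + 1 : Nat) : Int) := by
                omega
              rw [hcast]
              exact ih _ d (by omega) (by omega)
          · rw [if_neg h3, if_neg h3]
            by_cases h4 : cs[j] = '"'
            · rw [if_pos h4, if_pos h4, pvCast1]
              have hfu : (((cs.length : Int) - ((j + 1 : Nat) : Int)).toNat + 1) =
                  cs.length - (j + 1) + 1 := by omega
              rw [hfu, pvLBstr cs f (j + 1) d f (by omega) (by omega) (by omega)]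
              have hSge : ((j + 1 : Nat) : Int) ≤
                  aStrScan cs (cs.length : Int) ((j + 1 : Nat) : Int) (cs.length - (j + 1) + 1) :=
                aStrScan_ge cs _ _ _
              by_cases hS : aStrScan cs (cs.length : Int) ((j + 1 : Nat) : Int)
                  (cs.length - (j + 1) + 1) + 1 < (cs.length : Int)
              · have hcast : aStrScan cs (cs.length : Int) ((j + 1 : Nat) : Int)
                    (cs.length - (j + 1) + 1) + 1 =
                    (((aStrScan cs (cs.length : Int) ((j + 1 : Nat) : Int)
                      (cs.length - (j + 1) + 1) + 1).toNat : Nat) : Int) := by omega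
                rw [hcast]
                exact ih _ d (by omega) (by omega)
              · rw [aLoop_exit cs _ _ _ _ (by omega), bLoop_exit cs _ _ _ _ _ (by omega)]
            · rw [if_neg h4, if_neg h4]
              by_cases h5 : cs[j] = '{'
              · rw [if_pos h5, if_pos h5, pvCast1]
                exact ih _ _ (by omega) (by omega)
              · rw [if_neg h5, if_neg h5]
                by_cases h6 : cs[j] = '}'
                · rw [if_pos h6, if_pos h6]
                  by_cases h7 : d - 1 = 0
                  · rw [if_pos h7, if_pos h7]
                  · rw [if_neg h7, if_neg h7, pvCast1]
                    exact ih _ _ (by omega) (by omega)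
                · rw [if_neg h6, if_neg h6, pvCast1]
                  exact ih _ _ (by omega) (by omega)
    · have hje : j = cs.length := by omega
      subst hje
      rw [aLoop_exit cs _ _ _ _ (by omega), bLoop_exit cs _ _ _ _ _ (by omega)]

theorem pvFindOpen_eq (cs : List Char) (n : Int) : ∀ (f : Nat) (i : Int),
    aFindOpen cs n i f = bFindOpen cs n i f := by
  intro f
  induction f with
  | zero => intro i; rfl
  | succ f ih =>
    intro i
    simp only [aFindOpen, bFindOpen]
    split_ifs
    · exact ih _
    · rfl

theorem pvFindOpen_ge (cs : List Char) (n : Int) : ∀ (f : Nat) (i : Int),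
    i ≤ aFindOpen cs n i f := by
  intro f
  induction f with
  | zero => intro i; simp [aFindOpen]
  | succ f ih =>
    intro i
    simp only [aFindOpen]
    split_ifs
    · exact le_trans (by omega) (ih _)
    · exact le_refl _

theorem pv_spec : ∀ (text : String) (start : Int), 0 ≤ start →
    find_body_end_py text start = find_body_end_py_alt text start := by
  intro text start h0
  simp only [find_body_end_py, find_body_end_py_alt]
  rw [← pvFindOpen_eq]
  by_cases hcase : (text.toList.length : Int) ≤
      aFindOpen text.toList (text.toList.length : Int) start
        (((text.toList.length : Int) - start).toNat + 1)
  · rw [if_pos hcase, if_pos hcase]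
  · rw [if_neg hcase, if_neg hcase]
    have hge : start ≤ aFindOpen text.toList (text.toList.length : Int) start
        (((text.toList.length : Int) - start).toNat + 1) := pvFindOpen_ge _ _ _ _
    have hcast : aFindOpen text.toList (text.toList.length : Int) start
        (((text.toList.length : Int) - start).toNat + 1) =
        (((aFindOpen text.toList (text.toList.length : Int) start
          (((text.toList.length : Int) - start).toNat + 1)).toNat : Nat) : Int) := by omega
    rw [hcast]
    exact pvMain text.toList _ _ 0 (by omega) (by omega)

-- ===== VERDICT (by name: the statement is the Claim_ definition above) =====
theorem find_body_end_py_spec : Claim_equal_find_body_end_py := by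
  intro text start hdom hpre
  exact pv_spec text start hpre
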